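-- pv_equiv track=rewrite | github.com/hippan-git/Calc | calc.py | find_first_sign
-- ===== SOURCE A (Python) =====
-- def find_first_sign(ls: list) -> str:
--     pattern_sign_first = '*', '/'
--     pattern_sign_second = '+', '-'
--     for it in ls:
--         if it in pattern_sign_first:
--             return it
--     for it in ls:
--         if it in pattern_sign_second:
--             return it
--     pass
-- ===== SOURCE B (Python) =====
-- def find_first_sign(ls: list) -> str:
--     first_low = None
--     for it in ls:
--         if it in ('*', '/'):
--             return it
--         if it in ('+', '-') and first_low is None:
--             first_low = it
--     return first_low
-- ===== Notes on version B (the rewrite author's own statement) =====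
-- stated objective: alternative
-- what changed: Replaced A's two sequential scans of the list with one single pass that returns a high-priority operator immediately and remembers the first low-priority operator in an accumulator.
import Mathlib
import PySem

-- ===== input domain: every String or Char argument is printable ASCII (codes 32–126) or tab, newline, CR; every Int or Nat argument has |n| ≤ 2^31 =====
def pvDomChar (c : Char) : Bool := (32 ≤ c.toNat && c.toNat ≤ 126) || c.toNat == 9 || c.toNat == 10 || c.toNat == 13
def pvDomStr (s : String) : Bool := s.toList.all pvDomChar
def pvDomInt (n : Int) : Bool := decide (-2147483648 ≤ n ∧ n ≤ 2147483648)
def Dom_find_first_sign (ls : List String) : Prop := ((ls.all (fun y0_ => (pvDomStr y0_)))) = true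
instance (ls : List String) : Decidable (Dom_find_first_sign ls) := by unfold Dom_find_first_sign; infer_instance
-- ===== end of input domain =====

-- B replaces A's two sequential scans with one single pass carrying a `first_low` accumulator.

-- ===== PORT A =====
-- first loop of A: return the first '*' or '/'
def ffsLoop1 : List String → Option String
  | [] => none
  | it :: rest => if it = "*" ∨ it = "/" then some it else ffsLoop1 rest

-- second loop of A: return the first '+' or '-'
def ffsLoop2 : List String → Option String
  | [] => none
  | it :: rest => if it = "+" ∨ it = "-" then some it else ffsLoop2 rest

def find_first_sign (ls : List String) : Option String :=
  match ffsLoop1 ls with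
  | some x => some x
  | none => ffsLoop2 ls

-- ===== PORT B =====
-- single pass with accumulator first_low
def ffsAltLoop : List String → Option String → Option String
  | [], firstLow => firstLow
  | it :: rest, firstLow =>
    if it = "*" ∨ it = "/" then some it
    else if (it = "+" ∨ it = "-") ∧ firstLow = none then ffsAltLoop rest (some it)
    else ffsAltLoop rest firstLow

def find_first_sign_alt (ls : List String) : Option String :=
  ffsAltLoop ls none

-- ===== PRECONDITION & SPEC =====
def Spec_find_first_sign (ls : List String) (out : Option String) : Prop := out = find_first_sign_alt ls
instance (ls : List String) (out : Option String) : Decidable (Spec_find_first_sign ls out) := by unfold Spec_find_first_sign; infer_instance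

-- ===== CLAIM (what is proved, stated in full; the proofs are below) =====
def Claim_equal_find_first_sign : Prop := ∀ (ls : List String), Dom_find_first_sign ls → Spec_find_first_sign ls (find_first_sign ls)

-- ===== LEMMAS AND PROOFS =====
-- invariant of B's loop: it equals loop1's result, else the accumulator, else loop2's result
theorem ffsAltLoop_eq (ls : List String) : ∀ acc : Option String,
    ffsAltLoop ls acc =
      match ffsLoop1 ls with
      | some x => some x
      | none => match acc with
        | some a => some a
        | none => ffsLoop2 ls := by
  induction ls with
  | nil => intro acc; cases acc <;> simp [ffsAltLoop, ffsLoop1, ffsLoop2]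
  | cons it rest ih =>
    intro acc
    by_cases h1 : it = "*" ∨ it = "/"
    · simp [ffsAltLoop, ffsLoop1, h1]
    · by_cases h2 : it = "+" ∨ it = "-"
      · cases acc with
        | none =>
          have : ¬ (it = "*" ∨ it = "/") := h1
          simp [ffsAltLoop, ffsLoop1, ffsLoop2, h1, h2, ih]
        | some a =>
          simp [ffsAltLoop, ffsLoop1, ffsLoop2, h1, h2, ih]
      · cases acc with
        | none => simp [ffsAltLoop, ffsLoop1, ffsLoop2, h1, h2, ih]
        | some a => simp [ffsAltLoop, ffsLoop1, ffsLoop2, h1, h2, ih]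

-- ===== VERDICT (by name: the statement is the Claim_ definition above) =====
theorem find_first_sign_spec : Claim_equal_find_first_sign := by
  intro ls _
  unfold Spec_find_first_sign find_first_sign find_first_sign_alt
  rw [ffsAltLoop_eq]
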